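-- pv_equiv track=rewrite | github.com/park9707/Algorithm | programmers/기능개발/기능개발.py | solution
-- ===== SOURCE A (Python) =====
-- def solution(progresses, speeds):
--     answer = []
--     i = 0
--     d = 0
--     while i < len(progresses):
--         remain = 100 - progresses[i] - (speeds[i] * d)
--         d += remain // speeds[i]
--         if remain % speeds[i] != 0:
--             d += 1
--         i += 1
--         cnt = 1
--
--         while i < len(progresses) and 100 - progresses[i] <= speeds[i] * d:
--             cnt += 1
--             i += 1
--
--         answer.append(cnt)
--
--     return answer
-- ===== SOURCE B (Python) =====
-- def solution(progresses, speeds):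
--     answer = []
--     leader = None  # completion day of the current group's leader
--     cnt = 0
--     for p, s in zip(progresses, speeds):
--         if leader is not None and 100 - p <= s * leader:
--             cnt += 1
--         else:
--             if leader is not None:
--                 answer.append(cnt)
--             leader = -((p - 100) // s)
--             cnt = 1
--     if leader is not None:
--         answer.append(cnt)
--     return answer
-- ===== Notes on version B (the rewrite author's own statement) =====
-- stated objective: simpler
-- what changed: Replaces A's fused nested-while pass with its index juggling and incremental running-day update (relative remain, floor-division plus remainder correction) by a single for loop over the zipped jobs that computes each group leader's completion day directly with one ceiling division -((p-100)//s) and counts group members with a plain accumulator.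
-- outside the precondition, e.g. on solution([99, 150], [1, 0]): A returns [2], B returns [2]
import Mathlib
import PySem

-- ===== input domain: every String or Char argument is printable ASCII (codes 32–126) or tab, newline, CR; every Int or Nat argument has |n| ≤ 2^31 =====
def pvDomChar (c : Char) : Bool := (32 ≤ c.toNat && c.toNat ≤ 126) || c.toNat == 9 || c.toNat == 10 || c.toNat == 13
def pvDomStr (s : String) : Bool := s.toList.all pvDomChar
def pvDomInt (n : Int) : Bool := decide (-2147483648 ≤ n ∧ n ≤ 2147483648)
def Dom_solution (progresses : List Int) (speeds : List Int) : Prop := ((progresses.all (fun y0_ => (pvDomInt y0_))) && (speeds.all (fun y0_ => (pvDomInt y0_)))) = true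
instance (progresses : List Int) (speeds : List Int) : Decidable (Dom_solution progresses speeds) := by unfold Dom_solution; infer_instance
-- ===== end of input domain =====

-- B replaces A's fused nested-while pass (incremental running-day arithmetic) by one grouping loop
-- that computes each leader's completion day directly with a ceiling division; objective: simpler, same O(n).

-- ===== PORT A =====
-- inner while: scans forward while the next job is already finished by day d
def solInner (progresses speeds : List Int) (d : Int) (i : Nat) (cnt : Int) : Nat × Int :=
  if h : i < progresses.length ∧ 100 - progresses.getD i 0 ≤ speeds.getD i 0 * d then
    solInner progresses speeds d (i + 1) (cnt + 1)
  else (i, cnt)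
termination_by progresses.length - i
decreasing_by omega

theorem solInner_le (progresses speeds : List Int) (d : Int) (i : Nat) (cnt : Int) :
    i ≤ (solInner progresses speeds d i cnt).1 := by
  fun_induction solInner progresses speeds d i cnt with
  | case1 i cnt h ih => omega
  | case2 i cnt h => simp

-- outer while: advance d to job i's completion day, count the group, append
def solOuter (progresses speeds : List Int) (i : Nat) (d : Int) (answer : List Int) : List Int :=
  if h : i < progresses.length then
    let remain := 100 - progresses.getD i 0 - speeds.getD i 0 * d
    let d1 := d + PySem.Int.floordiv remain (speeds.getD i 0)
    let d2 := if PySem.Int.mod remain (speeds.getD i 0) ≠ 0 then d1 + 1 else d1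
    let r := solInner progresses speeds d2 (i + 1) 1
    solOuter progresses speeds r.1 d2 (answer ++ [r.2])
  else answer
termination_by progresses.length - i
decreasing_by
  exact Nat.sub_lt_sub_left h (Nat.lt_of_lt_of_le (Nat.lt_succ_self i) (solInner_le _ _ _ _ _))

def solution (progresses : List Int) (speeds : List Int) : List Int :=
  solOuter progresses speeds 0 0 []

-- ===== PORT B =====
-- one pass over the zipped jobs: a job joins the current group if it is done by the leader's day,
-- otherwise it becomes the leader of a new group, its day computed by the ceiling division -((p-100)//s)
def altGo : List (Int × Int) → List Int → Option Int → Int → List Int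
  | [], answer, leader, cnt =>
    match leader with
    | none => answer
    | some _ => answer ++ [cnt]
  | (p, s) :: rest, answer, leader, cnt =>
    match leader with
    | some ld =>
      if 100 - p ≤ s * ld then altGo rest answer (some ld) (cnt + 1)
      else altGo rest (answer ++ [cnt]) (some (-(PySem.Int.floordiv (p - 100) s))) 1
    | none => altGo rest answer (some (-(PySem.Int.floordiv (p - 100) s))) 1

def solution_alt (progresses : List Int) (speeds : List Int) : List Int :=
  altGo (progresses.zip speeds) [] none 0

-- ===== PRECONDITION & SPEC =====
-- Pre_ excludes: speeds shorter than progresses (A raises IndexError; B's zip silently truncates),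
-- and any zero among the used speeds: A (and B) raise ZeroDivisionError whenever a zero-speed job
-- becomes a group leader, and whether it does depends on the run, so Pre_ conservatively excludes
-- all zero used speeds (on a zero-speed job absorbed into a group both programs return the same value).
def Pre_solution (progresses : List Int) (speeds : List Int) : Prop :=
  progresses.length ≤ speeds.length ∧ ∀ x ∈ speeds.take progresses.length, x ≠ 0
instance (progresses : List Int) (speeds : List Int) : Decidable (Pre_solution progresses speeds) := by
  unfold Pre_solution; infer_instance

def pvWitness_solution : List Int × List Int := ([30, 95, 90], [5, 4, 30])

def Spec_solution (progresses : List Int) (speeds : List Int) (out : List Int) : Prop := out = solution_alt progresses speeds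
instance (progresses : List Int) (speeds : List Int) (out : List Int) : Decidable (Spec_solution progresses speeds out) := by unfold Spec_solution; infer_instance

-- ===== CLAIM (what is proved, stated in full; the proofs are below) =====
def Claim_equal_solution : Prop := ∀ (progresses : List Int) (speeds : List Int), Dom_solution progresses speeds → Pre_solution progresses speeds → Spec_solution progresses speeds (solution progresses speeds)

-- ===== LEMMAS AND PROOFS =====

-- proof-side abbreviation for A's running-day update at index i
def newD (p s : List Int) (i : Nat) (d : Int) : Int :=
  if PySem.Int.mod (100 - p.getD i 0 - s.getD i 0 * d) (s.getD i 0) ≠ 0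
    then d + PySem.Int.floordiv (100 - p.getD i 0 - s.getD i 0 * d) (s.getD i 0) + 1
    else d + PySem.Int.floordiv (100 - p.getD i 0 - s.getD i 0 * d) (s.getD i 0)

theorem solOuter_pos (p s : List Int) (i : Nat) (d : Int) (ans : List Int) (hi : i < p.length) :
    solOuter p s i d ans
      = solOuter p s (solInner p s (newD p s i d) (i + 1) 1).1 (newD p s i d)
          (ans ++ [(solInner p s (newD p s i d) (i + 1) 1).2]) := by
  rw [solOuter.eq_def, dif_pos hi]; rfl

theorem solOuter_neg (p s : List Int) (i : Nat) (d : Int) (ans : List Int) (hi : ¬ i < p.length) :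
    solOuter p s i d ans = ans := by
  rw [solOuter.eq_def, dif_neg hi]

theorem solInner_pos (p s : List Int) (d : Int) (i : Nat) (cnt : Int)
    (h : i < p.length ∧ 100 - p.getD i 0 ≤ s.getD i 0 * d) :
    solInner p s d i cnt = solInner p s d (i + 1) (cnt + 1) := by
  rw [solInner.eq_def, dif_pos h]

theorem solInner_neg (p s : List Int) (d : Int) (i : Nat) (cnt : Int)
    (h : ¬ (i < p.length ∧ 100 - p.getD i 0 ≤ s.getD i 0 * d)) :
    solInner p s d i cnt = (i, cnt) := by
  rw [solInner.eq_def, dif_neg h]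

-- A's running-day update lands exactly on the ceiling completion day of job i (positive divisor)
theorem ceil_step_pos (x s d : Int) (hs : 0 < s) :
    (if PySem.Int.mod (x - s * d) s ≠ 0
      then d + PySem.Int.floordiv (x - s * d) s + 1
      else d + PySem.Int.floordiv (x - s * d) s)
      = -(PySem.Int.floordiv (-x) s) := by
  rw [eq_comm, PySem.Int.neg_floordiv_neg_eq_iff_of_pos hs]
  have hfm := PySem.Int.floordiv_mul_add_mod (x - s * d) s
  have hm0 := PySem.Int.mod_nonneg (x - s * d) hs
  have hml := PySem.Int.mod_lt (x - s * d) hs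
  split_ifs with h
  · have hm0' : 0 < PySem.Int.mod (x - s * d) s := lt_of_le_of_ne hm0 (Ne.symm h)
    constructor <;> nlinarith [hfm, hm0', hml]
  · push_neg at h
    constructor <;> nlinarith [hfm, hml]

-- the same for any nonzero divisor, by reducing s < 0 to the positive case via (-a)//(-b) = a//b
theorem ceil_step (x s d : Int) (hs : s ≠ 0) :
    (if PySem.Int.mod (x - s * d) s ≠ 0
      then d + PySem.Int.floordiv (x - s * d) s + 1
      else d + PySem.Int.floordiv (x - s * d) s)
      = -(PySem.Int.floordiv (-x) s) := by
  rcases lt_or_gt_of_ne hs with hneg | hpos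
  · have e1 : PySem.Int.floordiv (x - s * d) s = PySem.Int.floordiv (-x - -s * d) (-s) := by
      rw [show (-x - -s * d : Int) = -(x - s * d) by ring, PySem.Int.floordiv_neg_neg]
    have e2 : PySem.Int.mod (x - s * d) s = -(PySem.Int.mod (-x - -s * d) (-s)) := by
      rw [show (-x - -s * d : Int) = -(x - s * d) by ring, PySem.Int.mod_neg_neg, neg_neg]
    have e3 : PySem.Int.floordiv (-x) s = PySem.Int.floordiv x (-s) := by
      rw [← PySem.Int.floordiv_neg_neg (-x) s, neg_neg]
    rw [e1, e2, e3, show (x : Int) = -(-x) by ring]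
    have := ceil_step_pos (-x) (-s) d (by omega)
    simpa [neg_eq_zero] using this
  · exact ceil_step_pos x s d hpos

-- A's new leader day equals B's direct ceiling division -((p-100)//s)
theorem newD_eq (p s : List Int) (i : Nat) (d : Int) (hs : s.getD i 0 ≠ 0) :
    newD p s i d = -(PySem.Int.floordiv (p.getD i 0 - 100) (s.getD i 0)) := by
  unfold newD
  rw [show (p.getD i 0 - 100 : Int) = -(100 - p.getD i 0) by ring]
  exact ceil_step (100 - p.getD i 0) (s.getD i 0) d hs

theorem zip_drop_cons (p s : List Int) (i : Nat) (hi : i < p.length) (hl : p.length ≤ s.length) :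
    (p.zip s).drop i = (p.getD i 0, s.getD i 0) :: (p.zip s).drop (i + 1) := by
  have hz : i < (p.zip s).length := by rw [List.length_zip]; omega
  have his : i < s.length := by omega
  rw [List.drop_eq_getElem_cons hz, List.getElem_zip]
  rw [List.getD_eq_getElem?_getD, List.getElem?_eq_getElem hi,
      List.getD_eq_getElem?_getD (l := s), List.getElem?_eq_getElem his]
  rfl

theorem zip_drop_nil (p s : List Int) (i : Nat) (hi : ¬ i < p.length) (hl : p.length ≤ s.length) :
    (p.zip s).drop i = [] := by
  apply List.drop_eq_nil_of_le; rw [List.length_zip]; omega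

theorem speed_ne (p s : List Int) (hpre : Pre_solution p s) (i : Nat) (hi : i < p.length) :
    s.getD i 0 ≠ 0 := by
  obtain ⟨hlen, hpos⟩ := hpre
  have his : i < s.length := by omega
  have hit : i < (s.take p.length).length := by simp; omega
  have hge : (s.take p.length)[i] = s[i] := List.getElem_take
  have := hpos (s.take p.length)[i] (List.getElem_mem hit)
  rw [List.getD_eq_getElem?_getD, List.getElem?_eq_getElem his]
  simpa [hge] using this

-- the bridge: A's (inner scan, then outer loop) from index i equals B's grouping loop on the zipped suffix
theorem bridge (p s : List Int) (hpre : Pre_solution p s) :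
    ∀ n i L cnt ans, p.length - i ≤ n →
      solOuter p s (solInner p s L i cnt).1 L (ans ++ [(solInner p s L i cnt).2])
        = altGo ((p.zip s).drop i) ans (some L) cnt := by
  intro n
  induction n with
  | zero =>
    intro i L cnt ans hn
    have hi : ¬ i < p.length := by omega
    rw [solInner_neg p s L i cnt (fun hc => hi hc.1)]
    rw [solOuter_neg p s i L _ hi]
    rw [zip_drop_nil p s i hi hpre.1, altGo]
  | succ n ih =>
    intro i L cnt ans hn
    by_cases hi : i < p.length
    · have hdrop := zip_drop_cons p s i hi hpre.1
      have hsi := speed_ne p s hpre i hi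
      by_cases hc : 100 - p.getD i 0 ≤ s.getD i 0 * L
      · -- inner while takes job i into the current group
        rw [solInner_pos p s L i cnt ⟨hi, hc⟩]
        rw [ih (i + 1) L (cnt + 1) ans (by omega)]
        rw [hdrop, altGo, if_pos hc]
      · -- inner while stops; outer loop starts a new group at job i
        rw [solInner_neg p s L i cnt (fun hcon => hc hcon.2)]
        rw [solOuter_pos p s i L _ hi]
        rw [newD_eq p s i L hsi]
        rw [ih (i + 1) (-(PySem.Int.floordiv (p.getD i 0 - 100) (s.getD i 0))) 1 (ans ++ [cnt]) (by omega)]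
        rw [hdrop, altGo, if_neg hc]
    · rw [solInner_neg p s L i cnt (fun hc => hi hc.1)]
      rw [solOuter_neg p s i L _ hi]
      rw [zip_drop_nil p s i hi hpre.1, altGo]

-- ===== VERDICT (by name: the statement is the Claim_ definition above) =====
theorem solution_spec : Claim_equal_solution := by
  intro p s _hdom hpre
  unfold Spec_solution solution solution_alt
  by_cases hp : p.length = 0
  · have hpz : p.zip s = [] := by
      cases p with
      | nil => rfl
      | cons a l => simp at hp
    rw [solOuter_neg p s 0 0 [] (by omega), hpz, altGo]
  · have h0 : 0 < p.length := by omega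
    rw [solOuter_pos p s 0 0 [] h0, newD_eq p s 0 0 (speed_ne p s hpre 0 h0)]
    rw [bridge p s hpre (p.length - 1) 1 (-(PySem.Int.floordiv (p.getD 0 0 - 100) (s.getD 0 0))) 1 [] (by omega)]
    have hz : p.zip s = (p.getD 0 0, s.getD 0 0) :: (p.zip s).drop 1 := by
      have := zip_drop_cons p s 0 h0 hpre.1
      rwa [List.drop_zero] at this
    conv_rhs => rw [hz]
    rfl
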